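-- pv_equiv track=rewrite | github.com/marshallmidden/m4 | testing/permutations/permutations.py | the_perms
-- ===== SOURCE A (Python) =====
-- import itertools
--
-- def the_perms(pre, mystr):
--     chars = list(mystr)
--     d = {}
--     for i in range(1,len(mystr)):
--         for comb in itertools.combinations(chars, i):
--             d[pre + ''.join(comb)] = 1
--         # rof
--     # rof
--
--     d[pre + mystr] = 1
--     return d
-- ===== SOURCE B (Python) =====
-- def the_perms(pre, mystr):
--     # DP right-to-left over the characters: rows[k] holds, in combinations
--     # order, all length-k subsequences of the suffix processed so far.
--     rows = [['']]
--     for c in reversed(mystr):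
--         rows.append([])
--         for k in range(len(rows) - 1, 0, -1):
--             rows[k] = [c + t for t in rows[k - 1]] + rows[k]
--     d = {}
--     for row in rows[1:-1]:
--         for s in row:
--             d[pre + s] = 1
--     d[pre + mystr] = 1
--     return d
-- ===== Notes on version B (the rewrite author's own statement) =====
-- stated objective: alternative
-- what changed: Replaces itertools.combinations enumerated size by size with a right-to-left Pascal-row dynamic programme over the characters that maintains, per length k, the list of length-k subsequence strings, then emits rows 1..n-1 and the full string; same keys in the same insertion order.
import Mathlib
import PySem

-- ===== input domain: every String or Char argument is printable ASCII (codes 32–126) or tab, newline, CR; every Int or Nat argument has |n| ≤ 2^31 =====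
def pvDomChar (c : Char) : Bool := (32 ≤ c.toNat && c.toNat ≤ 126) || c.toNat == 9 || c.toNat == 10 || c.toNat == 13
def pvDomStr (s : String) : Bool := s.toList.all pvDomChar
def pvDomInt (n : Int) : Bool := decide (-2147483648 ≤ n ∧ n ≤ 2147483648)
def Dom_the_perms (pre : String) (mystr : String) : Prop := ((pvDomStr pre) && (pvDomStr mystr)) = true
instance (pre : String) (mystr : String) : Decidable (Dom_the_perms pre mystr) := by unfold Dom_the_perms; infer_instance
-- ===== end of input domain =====

-- B replaces itertools.combinations grouped by size with a right-to-left Pascal-row DP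
-- over the characters (alternative decomposition; same keys in the same order).


-- ===== PORT A =====
-- literal port of A: for i in range(1, len(mystr)): for comb in combinations(chars, i): d[pre+''.join(comb)] = 1;
-- then d[pre+mystr] = 1.  combinations(chars, i) is PySem.List.combinations (i ≥ 1 here, so i.toNat is exact);
-- ''.join of a tuple of chars is String.ofList (exact).
def the_perms (pre : String) (mystr : String) : List (String × Int) :=
  (((PySem.List.pyRange 1 (PySem.Str.len mystr) 1).foldl
      (fun d i =>
        (PySem.List.combinations mystr.toList i.toNat).foldl
          (fun d comb => d.insert (pre ++ String.ofList comb) 1) d)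
      PySem.Dict.empty).insert (pre ++ mystr) 1).items

-- ===== PORT B =====
-- the inner 'for k in range(len(rows)-1, 0, -1): rows[k] = [c+t for t in rows[k-1]] + rows[k]':
-- each row (index ≥ 1) becomes prepended copies of the OLD previous row followed by itself.
def pvAux (c : Char) (prev : List String) : List (List String) → List (List String)
  | [] => []
  | r :: rs => (prev.map (fun t => String.ofList [c] ++ t) ++ r) :: pvAux c r rs

def pvStep (c : Char) (rows : List (List String)) : List (List String) :=
  match rows with
  | [] => []
  | r0 :: rest => r0 :: pvAux c r0 rest

def the_perms_alt (pre : String) (mystr : String) : List (String × Int) :=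
  (((PySem.List.slice
        (mystr.toList.reverse.foldl (fun rows c => pvStep c (rows ++ [[]])) [[""]])
        (some 1) (some (-1))).foldl
      (fun d row => row.foldl (fun d s => PySem.Dict.insert d (pre ++ s) 1) d)
      PySem.Dict.empty).insert (pre ++ mystr) 1).items

-- ===== PRECONDITION & SPEC =====
def Spec_the_perms (pre : String) (mystr : String) (out : List (String × Int)) : Prop := out = the_perms_alt pre mystr
instance (pre : String) (mystr : String) (out : List (String × Int)) : Decidable (Spec_the_perms pre mystr out) := by unfold Spec_the_perms; infer_instance

-- ===== CLAIM (what is proved, stated in full; the proofs are below) =====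
def Claim_equal_the_perms : Prop := ∀ (pre : String) (mystr : String), Dom_the_perms pre mystr → Spec_the_perms pre mystr (the_perms pre mystr)

-- ===== LEMMAS AND PROOFS =====
-- row k of B's table after consuming the char list cs (right-to-left) = the length-k combinations of cs
def pvG (cs : List Char) (k : Nat) : List String := (PySem.List.combinations cs k).map String.ofList
def pvRows (cs : List Char) : List (List String) := (List.range (cs.length + 1)).map (pvG cs)

lemma pvOfList_cons (c : Char) (l : List Char) :
    String.ofList [c] ++ String.ofList l = String.ofList (c :: l) :=
  String.ext (by simp)

lemma pvAux_map (c : Char) (g : Nat → List String) (m i : Nat) :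
    pvAux c (g i) ((List.range' (i+1) m).map g)
      = (List.range' (i+1) m).map
          (fun k => ((g (k-1)).map (fun t => String.ofList [c] ++ t)) ++ g k) := by
  induction m generalizing i with
  | zero => simp [pvAux]
  | succ m ih =>
    rw [List.range'_succ, List.map_cons, List.map_cons, pvAux]
    have h := ih (i+1)
    simp only [Nat.add_sub_cancel]
    exact congrArg _ (by simpa using h)

lemma pvG_cons (c : Char) (cs : List Char) (k : Nat) :
    pvG (c :: cs) (k+1) = (pvG cs k).map (fun t => String.ofList [c] ++ t) ++ pvG cs (k+1) := by
  simp only [pvG, PySem.List.combinations_cons_succ, List.map_append, List.map_map]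
  congr 1
  apply List.map_congr_left
  intro l _
  simp [Function.comp, pvOfList_cons]

lemma pvStep_rows (c : Char) (cs : List Char) :
    pvStep c (pvRows cs ++ [[]]) = pvRows (c :: cs) := by
  have hnil : pvG cs (cs.length + 1) = [] := by
    simp [pvG, PySem.List.combinations_eq_nil_of_length_lt (by omega)]
  have h1 : pvRows cs ++ [[]] = (List.range (cs.length + 2)).map (pvG cs) := by
    rw [show cs.length + 2 = (cs.length + 1) + 1 from rfl, List.range_succ, List.map_append]
    simp [pvRows, hnil]
  have hrange : ∀ n : Nat, List.range (n + 1) = 0 :: List.range' 1 n := by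
    intro n
    rw [List.range_eq_range', List.range'_succ]
  rw [h1, hrange, List.map_cons, pvStep]
  rw [pvAux_map c (pvG cs) (cs.length + 1) 0]
  show _ = pvRows (c :: cs)
  rw [pvRows, show (c :: cs).length + 1 = (cs.length + 1) + 1 from by simp, hrange, List.map_cons]
  congr 1
  · simp [pvG, PySem.List.combinations_zero]
  · apply List.map_congr_left
    intro k hk
    have h1k : 1 ≤ k := ((List.mem_range'_1.mp hk)).1
    obtain ⟨j, rfl⟩ : ∃ j, k = j + 1 := ⟨k - 1, by omega⟩
    rw [pvG_cons]
    simp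

lemma pvFold_rows (l cs : List Char) :
    l.foldl (fun rows c => pvStep c (rows ++ [[]])) (pvRows cs) = pvRows (l.reverse ++ cs) := by
  induction l generalizing cs with
  | nil => simp
  | cons c l ih =>
    rw [List.foldl_cons, pvStep_rows, ih]
    simp

lemma pvRows_nil : pvRows [] = [[""]] := by
  simp [pvRows, pvG, PySem.List.combinations_zero]

lemma pvSlice_tail_dropLast {α : Type} (xs : List α) :
    PySem.List.slice xs (some 1) (some (-1)) = xs.tail.dropLast := by
  show (xs.drop (PySem.List.clampIdx xs.length 1)).take
      (PySem.List.clampIdx xs.length (-1) - PySem.List.clampIdx xs.length 1) = _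
  rw [PySem.List.clampIdx_neg_one]
  rw [show (1:Int) = ((1:Nat):Int) from rfl, PySem.List.clampIdx_natCast]
  cases xs with
  | nil => simp
  | cons x t => simp [List.dropLast_eq_take]

lemma pvRange'_dropLast (n : Nat) : (List.range' 1 n).dropLast = List.range' 1 (n - 1) := by
  cases n with
  | zero => simp
  | succ m => rw [List.range'_concat]; simp

theorem the_perms_eq (pre mystr : String) : the_perms pre mystr = the_perms_alt pre mystr := by
  unfold the_perms the_perms_alt
  have hrows : mystr.toList.reverse.foldl (fun rows c => pvStep c (rows ++ [[]])) [[""]]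
      = pvRows mystr.toList := by
    rw [← pvRows_nil, pvFold_rows]
    simp
  rw [hrows]
  set cs := mystr.toList with hcs
  set n := cs.length with hn
  -- B's slice: rows[1:-1] = rows indexed 1 .. n-1
  have hslice : PySem.List.slice (pvRows cs) (some 1) (some (-1))
      = (List.range' 1 (n - 1)).map (pvG cs) := by
    rw [pvSlice_tail_dropLast, pvRows]
    have : List.range (n + 1) = 0 :: List.range' 1 n := by
      rw [List.range_eq_range', List.range'_succ]
    rw [← hn, this]
    simp only [List.map_cons, List.tail_cons]
    rw [← List.map_dropLast, pvRange'_dropLast]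
  rw [hslice]
  -- A's range: range(1, len(mystr)) = [1, …, n-1]
  have hlen : PySem.Str.len mystr = (n : Int) := by
    simp [PySem.Str.len_eq, hn, hcs]
  rw [hlen, PySem.List.pyRange_one]
  have htn : ((n : Int) - 1).toNat = n - 1 := by omega
  rw [htn]
  -- both outer folds become folds over List.range (n-1)
  rw [List.range'_eq_map_range]
  rw [List.foldl_map, List.foldl_map, List.foldl_map]
  congr 2
  apply PySem.List.foldl_congr_mem
  intro acc k _
  have hk : ((1 : Int) + (k : Nat)).toNat = 1 + k := by omega
  rw [hk]
  -- inner folds agree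
  simp only [pvG]
  rw [List.foldl_map]

-- ===== VERDICT (by name: the statement is the Claim_ definition above) =====
theorem the_perms_spec : Claim_equal_the_perms := by
  intro pre mystr _
  unfold Spec_the_perms
  exact the_perms_eq pre mystr
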